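-- pv_equiv track=rewrite | github.com/jgoliszewski/SortingVisualiser | insertionSort.py | colorArray
-- ===== SOURCE A (Python) =====
-- orange = '#ffa500'
--
-- def colorArray(lenData,idx, j):
-- 	colors = []
-- 	for x in range(lenData):
-- 		if x == idx:
-- 			colors.append("red")
-- 		elif x >j:
-- 			colors.append("gray")
-- 		else:
-- 			colors.append(orange)
-- 	return colors
-- ===== SOURCE B (Python) =====
-- orange = '#ffa500'
--
-- def colorArray(lenData, idx, j):
--     # Bulk construction: orange prefix, gray suffix, then red overwrite.
--     n = max(lenData, 0)
--     start = min(max(j + 1, 0), n)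
--     colors = [orange] * start + ["gray"] * (n - start)
--     if 0 <= idx < n:
--         colors[idx] = "red"
--     return colors
-- ===== Notes on version B (the rewrite author's own statement) =====
-- stated objective: simpler
-- what changed: Replaces the per-index branch loop with bulk construction: an orange prefix and gray suffix built by list repetition/concatenation, with a single red overwrite at idx done last.
import Mathlib
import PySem

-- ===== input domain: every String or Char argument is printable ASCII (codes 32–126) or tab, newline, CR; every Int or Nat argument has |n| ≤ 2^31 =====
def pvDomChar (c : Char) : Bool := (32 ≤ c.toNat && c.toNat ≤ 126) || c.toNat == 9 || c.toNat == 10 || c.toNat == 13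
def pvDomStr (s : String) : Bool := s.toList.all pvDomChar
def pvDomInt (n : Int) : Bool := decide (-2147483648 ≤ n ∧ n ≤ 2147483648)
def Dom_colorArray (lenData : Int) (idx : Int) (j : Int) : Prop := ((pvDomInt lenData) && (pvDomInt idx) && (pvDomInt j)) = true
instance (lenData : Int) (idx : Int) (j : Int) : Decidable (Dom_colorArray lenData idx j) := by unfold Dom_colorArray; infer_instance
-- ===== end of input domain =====

-- B replaces the per-index branch loop with bulk region construction (orange prefix ++ gray suffix, then one red overwrite); objective: simpler.


-- ===== PORT A =====
def colorArray (lenData : Int) (idx : Int) (j : Int) : List String :=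
  (PySem.List.pyRange 0 lenData 1).foldl
    (fun colors x =>
      if x = idx then colors ++ ["red"]
      else if x > j then colors ++ ["gray"]
      else colors ++ ["#ffa500"]) []

-- ===== PORT B =====
def colorArray_alt (lenData : Int) (idx : Int) (j : Int) : List String :=
  let n := max lenData 0
  let start := min (max (j + 1) 0) n
  let colors := List.replicate start.toNat "#ffa500" ++ List.replicate (n - start).toNat "gray"
  if 0 ≤ idx ∧ idx < n then colors.set idx.toNat "red" else colors

-- ===== PRECONDITION & SPEC =====
def Spec_colorArray (lenData : Int) (idx : Int) (j : Int) (out : List String) : Prop := out = colorArray_alt lenData idx j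
instance (lenData : Int) (idx : Int) (j : Int) (out : List String) : Decidable (Spec_colorArray lenData idx j out) := by unfold Spec_colorArray; infer_instance

-- ===== CLAIM (what is proved, stated in full; the proofs are below) =====
def Claim_equal_colorArray : Prop := ∀ (lenData : Int) (idx : Int) (j : Int), Dom_colorArray lenData idx j → Spec_colorArray lenData idx j (colorArray lenData idx j)

-- ===== LEMMAS AND PROOFS =====

-- A's fold is a map of the per-index color function over the range.
theorem colorArray_eq_map (lenData idx j : Int) :
    colorArray lenData idx j =
      (PySem.List.pyRange 0 lenData 1).map
        (fun x => if x = idx then "red" else if x > j then "gray" else "#ffa500") := by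
  unfold colorArray
  have h : (fun (colors : List String) (x : Int) =>
      if x = idx then colors ++ ["red"]
      else if x > j then colors ++ ["gray"]
      else colors ++ ["#ffa500"]) =
      (fun (colors : List String) (x : Int) =>
        colors ++ [if x = idx then "red" else if x > j then "gray" else "#ffa500"]) := by
    funext colors x; split_ifs <;> rfl
  rw [h, PySem.List.foldl_append_singleton_eq_map, List.nil_append]

-- The orange-prefix/gray-suffix block, indexed: position k is gray iff k > j.
theorem base_getElem (j n : Int) (hn : 0 ≤ n) (k : Nat) (hk : (k : Int) < n)
    (hk' : k < (List.replicate (min (max (j + 1) 0) n).toNat "#ffa500" ++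
        List.replicate (n - min (max (j + 1) 0) n).toNat "gray").length) :
    (List.replicate (min (max (j + 1) 0) n).toNat "#ffa500" ++
        List.replicate (n - min (max (j + 1) 0) n).toNat "gray")[k] =
      if (k : Int) > j then "gray" else "#ffa500" := by
  set start : Int := min (max (j + 1) 0) n with hstart
  by_cases hlt : k < start.toNat
  · have hl : k < (List.replicate start.toNat "#ffa500").length := by
      rw [List.length_replicate]; exact hlt
    rw [List.getElem_append_left hl, List.getElem_replicate, if_neg (by omega)]
  · have hl : (List.replicate start.toNat "#ffa500").length ≤ k := by
      rw [List.length_replicate]; omega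
    rw [List.getElem_append_right hl, List.getElem_replicate, if_pos (by omega)]

theorem colorArray_spec : Claim_equal_colorArray := by
  intro lenData idx j _
  unfold Spec_colorArray colorArray_alt
  rw [colorArray_eq_map, PySem.List.pyRange_one]
  simp only [List.map_map, Int.sub_zero]
  set n : Int := max lenData 0 with hn
  have hlen : lenData.toNat = n.toNat := by omega
  have hn0 : 0 ≤ n := by omega
  set start : Int := min (max (j + 1) 0) n with hstart
  set base := List.replicate start.toNat "#ffa500" ++ List.replicate (n - start).toNat "gray" with hbase
  have hbaselen : base.length = n.toNat := by
    simp [hbase]; omega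
  rw [hlen]
  split_ifs with hidx
  · apply List.ext_getElem
    · simpa [List.length_set] using hbaselen.symm
    · intro k h1 h2
      simp only [List.getElem_map, List.getElem_range, Function.comp_apply, zero_add]
      have hkn : (k : Int) < n := by
        have h1' : k < n.toNat := by simpa using h1
        omega
      have h2' : k < base.length := by simpa [List.length_set] using h2
      rw [List.getElem_set]
      by_cases he : (k : Int) = idx
      · rw [if_pos he, if_pos (by omega)]
      · rw [if_neg he, if_neg (show ¬(idx.toNat = k) by omega)]
        exact (base_getElem j n hn0 k hkn h2').symm
  · apply List.ext_getElem
    · simpa using hbaselen.symm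
    · intro k h1 h2
      simp only [List.getElem_map, List.getElem_range, Function.comp_apply, zero_add]
      have hkn : (k : Int) < n := by
        have h1' : k < n.toNat := by simpa using h1
        omega
      rw [if_neg (show ¬((k : Int) = idx) by omega)]
      exact (base_getElem j n hn0 k hkn h2).symm
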